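-- pv_equiv track=rewrite | github.com/Gyusik-Choi/algorithm | programmers/귤 고르기/귤 고르기.py | get_min_kind
-- ===== SOURCE A (Python) =====
-- def get_min_kind(arr: list, limit: int):
--     sums = 0
--     kind = 0
--
--     for key, value in arr:
--         sums += value
--         kind += 1
--
--         if sums >= limit:
--             break
--
--     return kind
-- ===== SOURCE B (Python) =====
-- def get_min_kind(arr: list, limit: int):
--     # Phase 1: build the table of running prefix sums.
--     prefix = []
--     s = 0
--     for _, value in arr:
--         s += value
--         prefix.append(s)
--     # Phase 2: search the table for the first prefix sum reaching limit.
--     for i, p in enumerate(prefix):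
--         if p >= limit:
--             return i + 1
--     return len(prefix)
-- ===== Notes on version B (the rewrite author's own statement) =====
-- stated objective: alternative
-- what changed: Replaces A's single interleaved accumulate-and-early-break loop with a two-phase build-a-prefix-sum-table then search-the-table-for-the-first-entry-reaching-limit decomposition.
import Mathlib
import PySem

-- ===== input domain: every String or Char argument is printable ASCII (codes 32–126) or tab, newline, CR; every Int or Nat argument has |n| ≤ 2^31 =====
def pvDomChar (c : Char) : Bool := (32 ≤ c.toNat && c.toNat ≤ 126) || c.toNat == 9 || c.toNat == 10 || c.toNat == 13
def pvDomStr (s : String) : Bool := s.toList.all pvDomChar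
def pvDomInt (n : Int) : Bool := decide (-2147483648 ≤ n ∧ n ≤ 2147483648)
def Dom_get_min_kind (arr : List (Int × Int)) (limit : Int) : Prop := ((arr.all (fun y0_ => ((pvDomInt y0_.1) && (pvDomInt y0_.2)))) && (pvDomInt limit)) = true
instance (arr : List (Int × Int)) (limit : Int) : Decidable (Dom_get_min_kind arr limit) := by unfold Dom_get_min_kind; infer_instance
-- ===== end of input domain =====

-- B replaces A's interleaved accumulate-and-break loop by building the prefix-sum
-- table first and then searching it for the first entry reaching limit (objective:
-- alternative decomposition; same O(n) cost).

-- ===== PORT A =====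
-- A's for-loop with early break: state (sums, kind), stop when sums ≥ limit.
def getMinKindLoopA (limit : Int) : List (Int × Int) → Int → Int → Int
  | [], _, kind => kind
  | (_, value) :: rest, sums, kind =>
      let sums := sums + value
      let kind := kind + 1
      if sums ≥ limit then kind else getMinKindLoopA limit rest sums kind

def get_min_kind (arr : List (Int × Int)) (limit : Int) : Int :=
  getMinKindLoopA limit arr 0 0

-- ===== PORT B =====
-- Phase 1 of Source B: the loop building the running prefix sums (state s).
def buildPrefixB : List (Int × Int) → Int → List Int
  | [], _ => []
  | (_, value) :: rest, s => (s + value) :: buildPrefixB rest (s + value)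

-- Phase 2 of Source B: enumerate-loop returning i+1 at the first entry ≥ limit.
def searchPrefixB (limit : Int) : List Int → Int → Option Int
  | [], _ => none
  | p :: rest, i => if p ≥ limit then some (i + 1) else searchPrefixB limit rest (i + 1)

def get_min_kind_alt (arr : List (Int × Int)) (limit : Int) : Int :=
  let pfx := buildPrefixB arr 0
  (searchPrefixB limit pfx 0).getD (pfx.length : Int)

-- ===== PRECONDITION & SPEC =====
def Spec_get_min_kind (arr : List (Int × Int)) (limit : Int) (out : Int) : Prop := out = get_min_kind_alt arr limit
instance (arr : List (Int × Int)) (limit : Int) (out : Int) : Decidable (Spec_get_min_kind arr limit out) := by unfold Spec_get_min_kind; infer_instance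

-- ===== CLAIM (what is proved, stated in full; the proofs are below) =====
def Claim_equal_get_min_kind : Prop := ∀ (arr : List (Int × Int)) (limit : Int), Dom_get_min_kind arr limit → Spec_get_min_kind arr limit (get_min_kind arr limit)

-- ===== LEMMAS AND PROOFS =====
theorem loopA_eq_search (limit : Int) :
    ∀ (arr : List (Int × Int)) (s kind : Int),
      getMinKindLoopA limit arr s kind =
        (searchPrefixB limit (buildPrefixB arr s) kind).getD
          (kind + ((buildPrefixB arr s).length : Int)) := by
  intro arr
  induction arr with
  | nil => intro s kind; simp [getMinKindLoopA, buildPrefixB, searchPrefixB]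
  | cons hd rest ih =>
      intro s kind
      obtain ⟨k, v⟩ := hd
      simp only [getMinKindLoopA, buildPrefixB, searchPrefixB]
      by_cases h : s + v ≥ limit
      · simp [h]
      · simp only [h, if_false]
        rw [ih (s + v) (kind + 1)]
        congr 1
        simp [List.length_cons]
        ring

-- ===== VERDICT (by name: the statement is the Claim_ definition above) =====
theorem get_min_kind_spec : Claim_equal_get_min_kind := by
  intro arr limit _
  unfold Spec_get_min_kind get_min_kind get_min_kind_alt
  rw [loopA_eq_search]
  simp
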